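-- pv_equiv track=rewrite | github.com/glopez99/advent_of_code | 2020/Day11/Day11.py | findFirstRightSeat
-- ===== SOURCE A (Python) =====
-- def findFirstRightSeat(i, j, currentSeating):
--   if currentSeating[i][j] == ".":
--     j = j + 1
--     if j < len(currentSeating[i]):
--       return findFirstRightSeat(i, j, currentSeating)
--     else:
--       return "L"
--   else:
--     return currentSeating[i][j]
-- ===== SOURCE B (Python) =====
-- def findFirstRightSeat(i, j, currentSeating):
--   row = currentSeating[i]
--   while True:
--     cell = row[j]
--     if cell != ".":
--       return cell
--     j += 1
--     if j >= len(row):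
--       return "L"
-- ===== Notes on version B (the rewrite author's own statement) =====
-- stated objective: idiomatic
-- what changed: Replaced the tail recursion (which re-indexes currentSeating[i] on every call) with a single row fetch followed by an iterative while-True loop with the cell read at the top, preserving the read-before-bounds-check order.
import Mathlib
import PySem

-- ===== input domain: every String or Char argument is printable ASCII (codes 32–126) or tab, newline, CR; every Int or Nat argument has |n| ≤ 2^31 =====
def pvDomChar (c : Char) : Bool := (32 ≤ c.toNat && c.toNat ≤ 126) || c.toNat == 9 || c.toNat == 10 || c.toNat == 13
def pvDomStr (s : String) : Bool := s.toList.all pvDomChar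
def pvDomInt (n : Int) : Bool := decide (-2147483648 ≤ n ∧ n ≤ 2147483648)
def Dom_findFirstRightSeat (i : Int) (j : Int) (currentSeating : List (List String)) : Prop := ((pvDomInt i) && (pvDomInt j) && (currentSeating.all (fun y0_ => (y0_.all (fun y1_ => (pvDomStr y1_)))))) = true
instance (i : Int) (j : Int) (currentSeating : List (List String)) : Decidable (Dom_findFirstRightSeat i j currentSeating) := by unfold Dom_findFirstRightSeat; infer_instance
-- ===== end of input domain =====

-- B is the same scan written as one row fetch plus an iterative loop (cell read at the top),
-- instead of A's tail recursion that re-indexes currentSeating[i] each call; return value only.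

-- ===== PORT A =====
-- A raises IndexError when currentSeating[i][j] fails; the port returns "" there, excluded by Pre_.
def findFirstRightSeat (i : Int) (j : Int) (currentSeating : List (List String)) : String :=
  match h : PySem.List.pyGet? currentSeating i with
  | none => ""
  | some row =>
    match PySem.List.pyGet? row j with
    | none => ""
    | some c =>
      if c = "." then
        if j + 1 < (row.length : Int) then findFirstRightSeat i (j + 1) currentSeating
        else "L"
      else c
termination_by ((((PySem.List.pyGet? currentSeating i).getD []).length : Int) - j).toNat
decreasing_by simp [h]; omega

-- ===== PORT B =====
-- the 'while True' loop of Source B: read row[j]; return it if not "."; j += 1; return "L" once j ≥ len(row)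
def pvAltLoop (row : List String) (j : Int) : String :=
  match PySem.List.pyGet? row j with
  | none => ""          -- IndexError, excluded by Pre_
  | some cell =>
    if cell ≠ "." then cell
    else if j + 1 ≥ (row.length : Int) then "L"
    else pvAltLoop row (j + 1)
termination_by ((row.length : Int) - j).toNat
decreasing_by omega

def findFirstRightSeat_alt (i : Int) (j : Int) (currentSeating : List (List String)) : String :=
  match PySem.List.pyGet? currentSeating i with
  | none => ""          -- IndexError, excluded by Pre_
  | some row => pvAltLoop row j

-- ===== PRECONDITION & SPEC =====
-- Pre_ excludes exactly the inputs on which A's first access currentSeating[i][j] raises IndexError.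
def Pre_findFirstRightSeat (i : Int) (j : Int) (currentSeating : List (List String)) : Prop :=
  PySem.Raise.InRange currentSeating.length i ∧
  PySem.Raise.InRange ((PySem.List.pyGet? currentSeating i).getD []).length j
instance (i : Int) (j : Int) (currentSeating : List (List String)) : Decidable (Pre_findFirstRightSeat i j currentSeating) := by unfold Pre_findFirstRightSeat; infer_instance

def pvWitness_findFirstRightSeat : Int × Int × List (List String) := (0, 0, [[".", "L"]])

def Spec_findFirstRightSeat (i : Int) (j : Int) (currentSeating : List (List String)) (out : String) : Prop := out = findFirstRightSeat_alt i j currentSeating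
instance (i : Int) (j : Int) (currentSeating : List (List String)) (out : String) : Decidable (Spec_findFirstRightSeat i j currentSeating out) := by unfold Spec_findFirstRightSeat; infer_instance

-- ===== CLAIM (what is proved, stated in full; the proofs are below) =====
def Claim_equal_findFirstRightSeat : Prop := ∀ (i : Int) (j : Int) (currentSeating : List (List String)), Dom_findFirstRightSeat i j currentSeating → Pre_findFirstRightSeat i j currentSeating → Spec_findFirstRightSeat i j currentSeating (findFirstRightSeat i j currentSeating)

-- ===== LEMMAS AND PROOFS =====

-- A's recursion agrees with B's loop on a fixed fetched row, for any in-range j.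
lemma pv_loop_eq (i : Int) (currentSeating : List (List String)) (row : List String)
    (hrow : PySem.List.pyGet? currentSeating i = some row) :
    ∀ (j : Int), PySem.Raise.InRange row.length j →
      findFirstRightSeat i j currentSeating = pvAltLoop row j := by
  intro j hj
  generalize hk : (((row.length : Int) - j).toNat) = k
  induction k generalizing j with
  | zero =>
    exfalso
    rcases hj with ⟨h1, h2⟩
    omega
  | succ k ih =>
    rcases hj with ⟨h1, h2⟩
    obtain ⟨c, hc⟩ : ∃ c, PySem.List.pyGet? row j = some c := by
      cases hcc : PySem.List.pyGet? row j with
      | none =>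
        exfalso
        have := (PySem.List.pyGet?_eq_none_iff (xs := row) (i := j)).mp hcc
        exact this ⟨h1, h2⟩
      | some c => exact ⟨c, rfl⟩
    rw [findFirstRightSeat, pvAltLoop]
    split
    · rename_i hnone; rw [hrow] at hnone; cases hnone
    rename_i row' hsome
    rw [hrow] at hsome
    injection hsome with hsame
    subst hsame
    simp only [hc]
    by_cases hdot : c = "."
    · subst hdot
      rw [if_pos rfl, if_neg (show ¬(("." : String) ≠ ".") by simp)]
      by_cases hlt : j + 1 < (row.length : Int)
      · rw [if_pos hlt, if_neg (by omega)]
        exact ih (j + 1) ⟨by omega, hlt⟩ (by omega)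
      · rw [if_neg hlt, if_pos (by omega)]
    · rw [if_neg hdot, if_pos hdot]

-- ===== VERDICT (by name: the statement is the Claim_ definition above) =====
theorem findFirstRightSeat_spec : Claim_equal_findFirstRightSeat := by
  intro i j cs _ hpre
  rcases hpre with ⟨hi, hj⟩
  unfold Spec_findFirstRightSeat
  obtain ⟨row, hrow⟩ : ∃ row, PySem.List.pyGet? cs i = some row := by
    cases hcc : PySem.List.pyGet? cs i with
    | none =>
      exfalso
      exact (PySem.List.pyGet?_eq_none_iff (xs := cs) (i := i)).mp hcc hi
    | some row => exact ⟨row, rfl⟩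
  unfold findFirstRightSeat_alt
  rw [hrow]
  have hj' : PySem.Raise.InRange row.length j := by rw [hrow] at hj; exact hj
  exact pv_loop_eq i cs row hrow j hj'
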